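-- pv_equiv track=rewrite | github.com/danidox/docs-scripts | old scripts/md_maker_next.py | indent_images_like_list_content
-- ===== SOURCE A (Python) =====
-- def indent_images_like_list_content(md_text: str) -> str:
--     """
--     Make Markdown image lines inside list items align with the list content (continuation indent).
--     Also collapses a single blank line between the list line and the image, if present.
--
--     Examples:
--       "- Foo\n\n![img](u)"     -> "- Foo\n  ![img](u)"
--       "  * Bar\n\n  ![img](u)" -> "  * Bar\n    ![img](u)"
--       "10. Baz\n\n![img](u)"   -> "10. Baz\n    ![img](u)"   (continuation indent width = len('10.') + 1)
--     """
--     import re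
--
--     lines = md_text.splitlines()
--     out = []
--     i, n = 0, len(lines)
--
--     list_head_re = re.compile(r'^(\s*)([-*+]|\d+\.)\s+(.*\S.*)$')  # base indent, marker, text
--     code_fence_re = re.compile(r'^\s*(```|~~~)')  # don’t modify inside fenced code blocks
--
--     inside_code = False
--
--     while i < n:
--         line = lines[i]
--
--         # Pass code fences through untouched
--         if code_fence_re.match(line):
--             inside_code = not inside_code
--             out.append(line)
--             i += 1
--             continue
--
--         if inside_code:
--             out.append(line)
--             i += 1
--             continue
--
--         m = list_head_re.match(line)
--         if not m:
--             out.append(line)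
--             i += 1
--             continue
--
--         # We’re at a list item head
--         base_indent, marker, _ = m.groups()
--         cont_indent = base_indent + (" " * (len(marker) + 1))  # align with first char after marker
--
--         out.append(line)
--         i += 1
--
--         # Walk forward within the same list item block:
--         #   - stop at a blank line followed by a dedented line,
--         #   - or a new sibling/parent list item (same or less indent),
--         #   - or a heading/fence.
--         while i < n:
--             nxt = lines[i]
--
--             # Stop on fences
--             if code_fence_re.match(nxt):
--                 break
--
--             # New list item at same/less indent -> stop
--             if re.match(rf'^{re.escape(base_indent)}([-*+]|\d+\.)\s+', nxt):
--                 break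
--
--             # Dedented non-empty line -> likely a new block
--             if nxt.strip() and len(nxt) - len(nxt.lstrip(" ")) < len(base_indent):
--                 break
--
--             # Collapse one blank line just before an image with base indent
--             if not nxt.strip():
--                 if (i + 1 < n) and re.match(rf'^{re.escape(base_indent)}!\[', lines[i + 1]):
--                     # skip the blank line
--                     i += 1
--                     nxt = lines[i]  # fall through to reindent the image below
--                 else:
--                     out.append(nxt)
--                     i += 1
--                     continue
--
--             # Reindent images that start at base indent to continuation indent
--             if re.match(rf'^{re.escape(base_indent)}!\[', nxt):
--                 out.append(re.sub(rf'^{re.escape(base_indent)}', cont_indent, nxt, count=1))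
--                 i += 1
--                 continue
--
--             # Any other line inside this list item
--             out.append(nxt)
--             i += 1
--
--         # loop ends when we hit a boundary (next list item / fence / etc.)
--     return "\n".join(out)
-- ===== SOURCE B (Python) =====
-- def _is_fence(line):
--     t = line.lstrip()
--     return t.startswith("```") or t.startswith("~~~")
--
-- def _marker(rest):
--     """Parse a list marker at the start of rest; return (marker, after) or None."""
--     if rest[:1] in ("-", "*", "+"):
--         return rest[0], rest[1:]
--     j = 0
--     while j < len(rest) and rest[j].isdigit():
--         j += 1
--     if j > 0 and rest[j:j + 1] == ".":
--         return rest[:j + 1], rest[j + 1:]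
--     return None
--
-- def _head(line):
--     """Return (base_indent, marker) if line is a list-item head, else None."""
--     rest = line.lstrip()
--     base = line[:len(line) - len(rest)]
--     m = _marker(rest)
--     if m is None:
--         return None
--     marker, after = m
--     if not after[:1].isspace():
--         return None
--     if not after.strip():
--         return None
--     return base, marker
--
-- def _sibling(base, line):
--     if not line.startswith(base):
--         return False
--     m = _marker(line[len(base):])
--     return m is not None and m[1][:1].isspace()
--
-- def indent_images_like_list_content(md_text: str) -> str:
--     lines = md_text.splitlines()
--     out = []
--     inside_code = False
--     block = None          # (base_indent, cont_indent) of the current list item, or None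
--     pending_image = False  # a blank line was just collapsed; reindent this line directly
--     for idx, line in enumerate(lines):
--         if pending_image:
--             base, cont = block
--             out.append(cont + line[len(base):])
--             pending_image = False
--             continue
--         if block is not None:
--             base, cont = block
--             if _is_fence(line):
--                 block = None
--                 inside_code = True
--                 out.append(line)
--                 continue
--             if _sibling(base, line) or (line.strip() and len(line) - len(line.lstrip(" ")) < len(base)):
--                 # boundary: treat this very line as a fresh top-level line (it is not a fence)
--                 h = _head(line)
--                 block = (h[0], h[0] + " " * (len(h[1]) + 1)) if h else None
--                 out.append(line)
--                 continue
--             if not line.strip():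
--                 if idx + 1 < len(lines) and lines[idx + 1].startswith(base + "!["):
--                     pending_image = True   # drop the blank; next line is reindented directly
--                 else:
--                     out.append(line)
--                 continue
--             if line.startswith(base + "!["):
--                 out.append(cont + line[len(base):])
--                 continue
--             out.append(line)
--             continue
--         if _is_fence(line):
--             inside_code = not inside_code
--             out.append(line)
--             continue
--         if inside_code:
--             out.append(line)
--             continue
--         h = _head(line)
--         if h:
--             block = (h[0], h[0] + " " * (len(h[1]) + 1))
--         out.append(line)
--     return "\n".join(out)
-- ===== Notes on version B (the rewrite author's own statement) =====
-- stated objective: simpler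
-- what changed: Replaces A's index-based nested while loops (inner scan per list item, with re-examination of boundary lines and per-line dynamically built regexes) by a single linear pass over the lines driven by an explicit state machine (top / inside-code / inside-list-block with a pending-image flag) using plain string operations.
import Mathlib
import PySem

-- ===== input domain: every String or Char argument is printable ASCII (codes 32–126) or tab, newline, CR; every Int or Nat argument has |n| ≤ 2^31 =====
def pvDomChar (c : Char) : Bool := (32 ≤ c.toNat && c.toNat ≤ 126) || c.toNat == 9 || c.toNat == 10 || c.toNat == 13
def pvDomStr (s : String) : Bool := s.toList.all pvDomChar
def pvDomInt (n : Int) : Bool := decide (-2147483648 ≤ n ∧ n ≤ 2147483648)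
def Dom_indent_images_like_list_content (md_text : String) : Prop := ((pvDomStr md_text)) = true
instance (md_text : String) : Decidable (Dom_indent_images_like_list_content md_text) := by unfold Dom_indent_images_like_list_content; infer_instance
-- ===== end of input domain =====

-- B replaces A's index-based nested while loops (with re-examination of boundary lines)
-- by a single pass over the lines with an explicit state machine; objective: simpler (and no per-line regexes in Python).

-- Shared ports of the regex tests both Pythons perform (A via re, B via string ops; same predicates).
-- code_fence_re: r'^\s*(```|~~~)'
def pvIsFence (l : List Char) : Bool :=
  PySem.Chars.startswith (PySem.Chars.lstrip l) "```".toList ||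
  PySem.Chars.startswith (PySem.Chars.lstrip l) "~~~".toList

-- the marker alternative r'([-*+]|\d+\.)' at the start of r; returns (marker, rest after marker)
def pvMarker (r : List Char) : Option (List Char × List Char) :=
  match r with
  | [] => none
  | c :: t =>
    if c = '-' ∨ c = '*' ∨ c = '+' then some ([c], t)
    else
      let ds := r.takeWhile PySem.Chars.isdigit
      if ds ≠ [] ∧ (r.drop ds.length).head? = some '.' then
        some (ds ++ ['.'], r.drop (ds.length + 1))
      else none

-- list_head_re: r'^(\s*)([-*+]|\d+\.)\s+(.*\S.*)$'  → (base indent, marker)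
def pvHead (l : List Char) : Option (List Char × List Char) :=
  let base := l.takeWhile PySem.Chars.isspace
  match pvMarker (PySem.Chars.lstrip l) with
  | none => none
  | some (m, after) =>
    match after with
    | [] => none
    | c :: _ =>
      if PySem.Chars.isspace c && !(PySem.Chars.strip after).isEmpty then some (base, m)
      else none

-- rf'^{re.escape(base)}([-*+]|\d+\.)\s+'
def pvSibling (base l : List Char) : Bool :=
  if base.isPrefixOf l then
    match pvMarker (l.drop base.length) with
    | some (_, after) =>
      match after with
      | c :: _ => PySem.Chars.isspace c
      | [] => false
    | none => false
  else false

-- rf'^{re.escape(base)}!\['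
def pvImage (base l : List Char) : Bool := (base ++ "![".toList).isPrefixOf l

-- not nxt.strip()
def pvBlank (l : List Char) : Bool := (PySem.Chars.strip l).isEmpty

-- len(nxt) - len(nxt.lstrip(" ")) < len(base)
def pvDedent (base l : List Char) : Bool := (l.takeWhile (· = ' ')).length < base.length

-- ===== PORT A =====
-- inner while loop: state (i, out); returns at a boundary or at end of input (fuel ≥ n - i suffices)
def pvAInner (ls : List (List Char)) (n : Nat) (base cont : List Char) :
    Nat → Nat → List (List Char) → Nat × List (List Char)
  | 0, i, out => (i, out)
  | fuel + 1, i, out =>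
    if i < n then
      let nxt := ls.getD i []
      if pvIsFence nxt then (i, out)
      else if pvSibling base nxt then (i, out)
      else if !pvBlank nxt && pvDedent base nxt then (i, out)
      else if pvBlank nxt then
        if i + 1 < n && pvImage base (ls.getD (i + 1) []) then
          -- skip the blank line; the image line falls through to the reindent below
          pvAInner ls n base cont fuel (i + 2)
            (out ++ [cont ++ (ls.getD (i + 1) []).drop base.length])
        else pvAInner ls n base cont fuel (i + 1) (out ++ [nxt])
      else if pvImage base nxt then
        pvAInner ls n base cont fuel (i + 1) (out ++ [cont ++ nxt.drop base.length])
      else pvAInner ls n base cont fuel (i + 1) (out ++ [nxt])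
    else (i, out)

-- outer while loop: state (inside_code, i, out)
def pvAOuter (ls : List (List Char)) (n : Nat) :
    Nat → Bool → Nat → List (List Char) → List (List Char)
  | 0, _, _, out => out
  | fuel + 1, inside, i, out =>
    if i < n then
      let line := ls.getD i []
      if pvIsFence line then pvAOuter ls n fuel (!inside) (i + 1) (out ++ [line])
      else if inside then pvAOuter ls n fuel inside (i + 1) (out ++ [line])
      else
        match pvHead line with
        | none => pvAOuter ls n fuel inside (i + 1) (out ++ [line])
        | some (b, m) =>
          let c := b ++ List.replicate (m.length + 1) ' '
          let p := pvAInner ls n b c fuel (i + 1) (out ++ [line])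
          pvAOuter ls n fuel inside p.1 p.2
    else out

def indent_images_like_list_content (md_text : String) : String :=
  String.ofList (PySem.Chars.join "\n".toList
    (pvAOuter (PySem.Chars.splitlines md_text.toList)
      (PySem.Chars.splitlines md_text.toList).length
      ((PySem.Chars.splitlines md_text.toList).length + 1) false 0 []))

-- ===== PORT B =====
-- B's explicit state: top level / inside a fenced code block / inside a list item's continuation
-- (pending = a blank line was just collapsed, so this line is reindented directly)
inductive PvBSt : Type
  | top : PvBSt
  | code : PvBSt
  | block : List Char → List Char → Bool → PvBSt

-- entering a (non-fence) line at top level: start a block at a list head, else stay at top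
def pvEnter (l : List Char) : PvBSt :=
  match pvHead l with
  | some (b, m) => PvBSt.block b (b ++ List.replicate (m.length + 1) ' ') false
  | none => PvBSt.top

def pvBGo : PvBSt → List (List Char) → List (List Char) → List (List Char)
  | _, [], out => out
  | st, l :: rest, out =>
    match st with
    | PvBSt.code =>
      if pvIsFence l then pvBGo PvBSt.top rest (out ++ [l])
      else pvBGo PvBSt.code rest (out ++ [l])
    | PvBSt.top =>
      if pvIsFence l then pvBGo PvBSt.code rest (out ++ [l])
      else pvBGo (pvEnter l) rest (out ++ [l])
    | PvBSt.block b c pending =>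
      if pending then pvBGo (PvBSt.block b c false) rest (out ++ [c ++ l.drop b.length])
      else if pvIsFence l then pvBGo PvBSt.code rest (out ++ [l])
      else if pvSibling b l || (!pvBlank l && pvDedent b l) then
        -- boundary: this very line is re-entered at top level (it is not a fence)
        pvBGo (pvEnter l) rest (out ++ [l])
      else if pvBlank l then
        if (match rest.head? with | some nx => pvImage b nx | none => false) then
          pvBGo (PvBSt.block b c true) rest out
        else pvBGo (PvBSt.block b c false) rest (out ++ [l])
      else if pvImage b l then pvBGo (PvBSt.block b c false) rest (out ++ [c ++ l.drop b.length])
      else pvBGo (PvBSt.block b c false) rest (out ++ [l])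

def indent_images_like_list_content_alt (md_text : String) : String :=
  String.ofList (PySem.Chars.join "\n".toList
    (pvBGo PvBSt.top (PySem.Chars.splitlines md_text.toList) []))

-- ===== PRECONDITION & SPEC =====
def Spec_indent_images_like_list_content (md_text : String) (out : String) : Prop := out = indent_images_like_list_content_alt md_text
instance (md_text : String) (out : String) : Decidable (Spec_indent_images_like_list_content md_text out) := by unfold Spec_indent_images_like_list_content; infer_instance

-- ===== CLAIM (what is proved, stated in full; the proofs are below) =====
def Claim_equal_indent_images_like_list_content : Prop := ∀ (md_text : String), Dom_indent_images_like_list_content md_text → Spec_indent_images_like_list_content md_text (indent_images_like_list_content md_text)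

-- ===== LEMMAS AND PROOFS =====

-- one-step equations for pvBGo (each is its defining equation under the stated branch conditions)
theorem pvBGo_nil (st : PvBSt) (out : List (List Char)) : pvBGo st [] out = out := by
  cases st <;> rfl

theorem pvBGo_code_fence {l : List Char} (rest out : List (List Char))
    (hf : pvIsFence l = true) :
    pvBGo PvBSt.code (l :: rest) out = pvBGo PvBSt.top rest (out ++ [l]) := by
  simp [pvBGo, hf]

theorem pvBGo_code_non {l : List Char} (rest out : List (List Char))
    (hf : pvIsFence l = false) :
    pvBGo PvBSt.code (l :: rest) out = pvBGo PvBSt.code rest (out ++ [l]) := by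
  simp [pvBGo, hf]

theorem pvBGo_top_fence {l : List Char} (rest out : List (List Char))
    (hf : pvIsFence l = true) :
    pvBGo PvBSt.top (l :: rest) out = pvBGo PvBSt.code rest (out ++ [l]) := by
  simp [pvBGo, hf]

theorem pvBGo_top_non {l : List Char} (rest out : List (List Char))
    (hf : pvIsFence l = false) :
    pvBGo PvBSt.top (l :: rest) out = pvBGo (pvEnter l) rest (out ++ [l]) := by
  simp [pvBGo, hf]

theorem pvBGo_block_pending {b c l : List Char} (rest out : List (List Char)) :
    pvBGo (PvBSt.block b c true) (l :: rest) out =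
      pvBGo (PvBSt.block b c false) rest (out ++ [c ++ l.drop b.length]) := by
  simp [pvBGo]

theorem pvBGo_block_fence {b c l : List Char} (rest out : List (List Char))
    (hf : pvIsFence l = true) :
    pvBGo (PvBSt.block b c false) (l :: rest) out = pvBGo PvBSt.code rest (out ++ [l]) := by
  simp [pvBGo, hf]

theorem pvBGo_block_bound {b c l : List Char} (rest out : List (List Char))
    (hf : pvIsFence l = false)
    (hbd : (pvSibling b l || (!pvBlank l && pvDedent b l)) = true) :
    pvBGo (PvBSt.block b c false) (l :: rest) out = pvBGo (pvEnter l) rest (out ++ [l]) := by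
  simp [pvBGo, hf, hbd]

theorem pvBGo_block_blank_collapse {b c l : List Char} (rest out : List (List Char))
    (hf : pvIsFence l = false) (hs : pvSibling b l = false) (hb : pvBlank l = true)
    (hh : (match rest.head? with | some nx => pvImage b nx | none => false) = true) :
    pvBGo (PvBSt.block b c false) (l :: rest) out = pvBGo (PvBSt.block b c true) rest out := by
  simp [pvBGo, hf, hs, hb, hh]

theorem pvBGo_block_blank_keep {b c l : List Char} (rest out : List (List Char))
    (hf : pvIsFence l = false) (hs : pvSibling b l = false) (hb : pvBlank l = true)
    (hh : (match rest.head? with | some nx => pvImage b nx | none => false) = false) :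
    pvBGo (PvBSt.block b c false) (l :: rest) out =
      pvBGo (PvBSt.block b c false) rest (out ++ [l]) := by
  simp [pvBGo, hf, hs, hb, hh]

theorem pvBGo_block_image {b c l : List Char} (rest out : List (List Char))
    (hf : pvIsFence l = false) (hs : pvSibling b l = false) (hdt : pvDedent b l = false)
    (hb : pvBlank l = false) (him : pvImage b l = true) :
    pvBGo (PvBSt.block b c false) (l :: rest) out =
      pvBGo (PvBSt.block b c false) rest (out ++ [c ++ l.drop b.length]) := by
  simp [pvBGo, hf, hs, hdt, hb, him]

theorem pvBGo_block_other {b c l : List Char} (rest out : List (List Char))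
    (hf : pvIsFence l = false) (hs : pvSibling b l = false) (hdt : pvDedent b l = false)
    (hb : pvBlank l = false) (him : pvImage b l = false) :
    pvBGo (PvBSt.block b c false) (l :: rest) out =
      pvBGo (PvBSt.block b c false) rest (out ++ [l]) := by
  simp [pvBGo, hf, hs, hdt, hb, him]

theorem pvAInner_fst_ge (ls : List (List Char)) (n : Nat) (b c : List Char) :
    ∀ fuel i out, i ≤ (pvAInner ls n b c fuel i out).1 := by
  intro fuel
  induction fuel with
  | zero => intro i out; simp [pvAInner]
  | succ fuel ih =>
    intro i out
    simp only [pvAInner]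
    split_ifs <;> first
      | (refine le_trans ?_ (ih _ _); omega)
      | simp

theorem pvInner_eq (ls : List (List Char)) (b c : List Char) :
    ∀ fuel i out, ls.length ≤ i + fuel →
      pvBGo (PvBSt.block b c false) (ls.drop i) out =
        pvBGo PvBSt.top (ls.drop (pvAInner ls ls.length b c fuel i out).1)
          (pvAInner ls ls.length b c fuel i out).2 := by
  intro fuel
  induction fuel with
  | zero =>
    intro i out h
    have hd : ls.drop i = [] := List.drop_eq_nil_of_le (by omega)
    simp [pvAInner, hd, pvBGo_nil]
  | succ fuel ih =>
    intro i out h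
    by_cases hi : i < ls.length
    · have hd : ls.drop i = ls[i] :: ls.drop (i + 1) := List.drop_eq_getElem_cons hi
      have hg : ls.getD i [] = ls[i] := List.getD_eq_getElem ls [] hi
      rw [hd]
      simp only [pvAInner, if_pos hi, hg]
      cases hf : pvIsFence ls[i] with
      | true => rw [if_pos rfl, pvBGo_block_fence _ _ hf, ← pvBGo_top_fence _ _ hf, ← hd]
      | false =>
      rw [if_neg (by simp)]
      cases hs : pvSibling b ls[i] with
      | true =>
        rw [if_pos rfl, pvBGo_block_bound _ _ hf (by simp [hs]), ← pvBGo_top_non _ _ hf, ← hd]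
      | false =>
      rw [if_neg (by simp)]
      cases hdd : (!pvBlank ls[i] && pvDedent b ls[i]) with
      | true =>
        rw [if_pos rfl, pvBGo_block_bound _ _ hf (by simp [hdd]), ← pvBGo_top_non _ _ hf, ← hd]
      | false =>
      rw [if_neg (by simp)]
      cases hb : pvBlank ls[i] with
      | true =>
        rw [if_pos rfl]
        cases hc : (decide (i + 1 < ls.length) && pvImage b (ls.getD (i + 1) [])) with
        | true =>
          have hi1 : i + 1 < ls.length := by
            have := (Bool.and_eq_true _ _).mp hc; simpa using this.1
          have hg1 : ls.getD (i + 1) [] = ls[i + 1] := List.getD_eq_getElem ls [] hi1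
          have him : pvImage b ls[i + 1] = true := by
            have h2 := ((Bool.and_eq_true _ _).mp hc).2
            rwa [hg1] at h2
          have hd1 : ls.drop (i + 1) = ls[i + 1] :: ls.drop (i + 2) :=
            List.drop_eq_getElem_cons hi1
          have hh : (match (ls.drop (i + 1)).head? with
              | some nx => pvImage b nx | none => false) = true := by
            rw [hd1]; simp only [List.head?_cons]; exact him
          rw [if_pos rfl, pvBGo_block_blank_collapse _ _ hf hs hb hh, hd1,
            pvBGo_block_pending, hg1]
          exact ih (i + 2) _ (by omega)
        | false =>
          have hh : (match (ls.drop (i + 1)).head? with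
              | some nx => pvImage b nx | none => false) = false := by
            by_cases hi1 : i + 1 < ls.length
            · have hg1 : ls.getD (i + 1) [] = ls[i + 1] := List.getD_eq_getElem ls [] hi1
              have hc' : pvImage b ls[i + 1] = false := by
                rw [hg1] at hc
                simpa [hi1] using hc
              rw [List.drop_eq_getElem_cons hi1]
              simp only [List.head?_cons]
              exact hc'
            · rw [List.drop_eq_nil_of_le (by omega)]; rfl
          rw [if_neg (by simp), pvBGo_block_blank_keep _ _ hf hs hb hh]
          exact ih (i + 1) _ (by omega)
      | false =>
        rw [if_neg (by simp)]
        have hdt : pvDedent b ls[i] = false := by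
          simpa [hb] using hdd
        cases him : pvImage b ls[i] with
        | true =>
          rw [if_pos rfl, pvBGo_block_image _ _ hf hs hdt hb him]
          exact ih (i + 1) _ (by omega)
        | false =>
          rw [if_neg (by simp), pvBGo_block_other _ _ hf hs hdt hb him]
          exact ih (i + 1) _ (by omega)
    · have hd : ls.drop i = [] := List.drop_eq_nil_of_le (by omega)
      simp [pvAInner, hi, hd, pvBGo_nil]

theorem pvOuter_eq (ls : List (List Char)) :
    ∀ fuel inside i out, ls.length < i + fuel →
      pvAOuter ls ls.length fuel inside i out =
        pvBGo (if inside then PvBSt.code else PvBSt.top) (ls.drop i) out := by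
  intro fuel
  induction fuel with
  | zero =>
    intro inside i out h
    have hd : ls.drop i = [] := List.drop_eq_nil_of_le (by omega)
    simp [pvAOuter, hd, pvBGo_nil]
  | succ fuel ih =>
    intro inside i out h
    by_cases hi : i < ls.length
    · have hd : ls.drop i = ls[i] :: ls.drop (i + 1) := List.drop_eq_getElem_cons hi
      have hg : ls.getD i [] = ls[i] := List.getD_eq_getElem ls [] hi
      rw [hd]
      simp only [pvAOuter, if_pos hi, hg]
      cases hf : pvIsFence ls[i] with
      | true =>
        rw [if_pos rfl, ih (!inside) (i + 1) _ (by omega)]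
        cases inside
        · show pvBGo PvBSt.code (ls.drop (i + 1)) (out ++ [ls[i]]) =
            pvBGo PvBSt.top (ls[i] :: ls.drop (i + 1)) out
          rw [pvBGo_top_fence _ _ hf]
        · show pvBGo PvBSt.top (ls.drop (i + 1)) (out ++ [ls[i]]) =
            pvBGo PvBSt.code (ls[i] :: ls.drop (i + 1)) out
          rw [pvBGo_code_fence _ _ hf]
      | false =>
        cases inside with
        | true =>
          rw [ih true (i + 1) _ (by omega)]
          show pvBGo PvBSt.code (ls.drop (i + 1)) (out ++ [ls[i]]) =
            pvBGo PvBSt.code (ls[i] :: ls.drop (i + 1)) out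
          rw [pvBGo_code_non _ _ hf]
        | false =>
          cases hh : pvHead ls[i] with
          | none =>
            show pvAOuter ls ls.length fuel false (i + 1) (out ++ [ls[i]]) =
              pvBGo PvBSt.top (ls[i] :: ls.drop (i + 1)) out
            rw [ih false (i + 1) _ (by omega)]
            show pvBGo PvBSt.top (ls.drop (i + 1)) (out ++ [ls[i]]) =
              pvBGo PvBSt.top (ls[i] :: ls.drop (i + 1)) out
            rw [pvBGo_top_non _ _ hf]
            simp only [pvEnter, hh]
          | some bm =>
            obtain ⟨bb, mm⟩ := bm
            have hge := pvAInner_fst_ge ls ls.length bb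
              (bb ++ List.replicate (mm.length + 1) ' ') fuel (i + 1) (out ++ [ls[i]])
            show pvAOuter ls ls.length fuel false
                (pvAInner ls ls.length bb (bb ++ List.replicate (mm.length + 1) ' ')
                  fuel (i + 1) (out ++ [ls[i]])).1
                (pvAInner ls ls.length bb (bb ++ List.replicate (mm.length + 1) ' ')
                  fuel (i + 1) (out ++ [ls[i]])).2 =
              pvBGo PvBSt.top (ls[i] :: ls.drop (i + 1)) out
            rw [ih false _ _ (by omega)]
            show pvBGo PvBSt.top
                (ls.drop (pvAInner ls ls.length bb (bb ++ List.replicate (mm.length + 1) ' ')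
                  fuel (i + 1) (out ++ [ls[i]])).1)
                (pvAInner ls ls.length bb (bb ++ List.replicate (mm.length + 1) ' ')
                  fuel (i + 1) (out ++ [ls[i]])).2 =
              pvBGo PvBSt.top (ls[i] :: ls.drop (i + 1)) out
            rw [← pvInner_eq ls bb (bb ++ List.replicate (mm.length + 1) ' ')
              fuel (i + 1) (out ++ [ls[i]]) (by omega)]
            rw [pvBGo_top_non _ _ hf]
            simp only [pvEnter, hh]
    · have hd : ls.drop i = [] := List.drop_eq_nil_of_le (by omega)
      simp [pvAOuter, hi, hd, pvBGo_nil]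

-- ===== VERDICT (by name: the statement is the Claim_ definition above) =====
theorem indent_images_like_list_content_spec : Claim_equal_indent_images_like_list_content := by
  intro md _
  unfold Spec_indent_images_like_list_content
  unfold indent_images_like_list_content indent_images_like_list_content_alt
  have := pvOuter_eq (PySem.Chars.splitlines md.toList)
    ((PySem.Chars.splitlines md.toList).length + 1) false 0 [] (by omega)
  simp only [List.drop_zero, if_neg (by simp : ¬(false = true))] at this
  rw [this]
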